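-- pv_equiv track=rewrite | github.com/johnshiver/advent_of_code | 2021/day03/main.py | analyze_report
-- ===== SOURCE A (Python) =====
-- def analyze_report(report):
--     gamma = [0] * len(report[0])
--     # episolon is equal to not gamma
--
--     for line in report:
--         line = [int(l) for l in line]
--         for i in range(len(gamma)):
--             if line[i] > 0:
--                 gamma[i] += 1
--             else:
--                 gamma[i] -= 1
--     gamma = ["0" if i < 0 else "1" for i in gamma]
--     epis = ["0" if i == "1" else "1" for i in gamma]
--
--     gamma = int("".join(gamma), 2)
--     epis = int("".join(epis), 2)
--     return gamma * epis
-- ===== SOURCE B (Python) =====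
-- def analyze_report(report):
--     n = len(report)
--     width = len(report[0])
--     gamma = 0
--     for i in range(width):
--         column = sorted(1 if int(row[i]) > 0 else 0 for row in report)
--         gamma = 2 * gamma + column[n // 2]
--     epsilon = (1 << width) - 1 - gamma
--     return gamma * epsilon
-- ===== Notes on version B (the rewrite author's own statement) =====
-- stated objective: alternative
-- what changed: A's row-major +/-1 tally and complement bit-string parsing are replaced by a sort-and-median algorithm: each column is sorted and the majority bit read off as its upper median (index n//2), gamma is built with an integer accumulator and epsilon derived arithmetically as (1<<width)-1-gamma.
import Mathlib
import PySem

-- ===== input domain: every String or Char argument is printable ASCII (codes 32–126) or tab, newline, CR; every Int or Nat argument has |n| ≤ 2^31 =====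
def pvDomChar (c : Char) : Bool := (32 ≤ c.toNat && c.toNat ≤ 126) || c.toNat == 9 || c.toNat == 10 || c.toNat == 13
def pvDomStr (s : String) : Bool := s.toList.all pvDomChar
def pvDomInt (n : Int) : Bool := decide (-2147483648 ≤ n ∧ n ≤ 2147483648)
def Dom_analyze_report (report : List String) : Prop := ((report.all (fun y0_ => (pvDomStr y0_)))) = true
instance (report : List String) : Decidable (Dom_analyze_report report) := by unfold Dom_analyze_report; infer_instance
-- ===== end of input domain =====

-- B replaces A's row-major ±1 tally and complement bit-string by a sort-and-median pass:
-- each column is sorted and its upper median is the gamma bit; epsilon = 2^width - 1 - gamma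
-- (objective: alternative algorithm, same behaviour on Pre_).

-- shared port of Python's int(s, 2) on a list of '0'/'1' chars
def pvBinToInt (bits : List Char) : Int :=
  bits.foldl (fun a c => 2 * a + (if c = '1' then 1 else 0)) 0

-- port of Python's int(c) on a single digit character (exact on digits; Pre_ keeps us there)
def pvDigit (c : Char) : Int := (c.toNat : Int) - 48

-- ===== PORT A =====
def analyze_report (report : List String) : Int :=
  let gamma0 : List Int := List.replicate (report.headD "").length 0
  let gamma : List Int := report.foldl (fun g line =>
      let ds := line.toList.map pvDigit
      g.mapIdx (fun i v => if ds.getD i 0 > 0 then v + 1 else v - 1)) gamma0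
  let gbits : List Char := gamma.map (fun v => if v < 0 then '0' else '1')
  let ebits : List Char := gbits.map (fun c => if c = '1' then '0' else '1')
  pvBinToInt gbits * pvBinToInt ebits

-- ===== PORT B =====
def analyze_report_alt (report : List String) : Int :=
  let n : Nat := report.length
  let width : Nat := (report.headD "").length
  let gamma : Int := (List.range width).foldl (fun g i =>
      let column : List Int := PySem.List.sorted
        (report.map (fun row => if 0 < pvDigit (row.toList.getD i '0') then (1 : Int) else 0))
        (fun x => x) false
      2 * g + column.getD (n / 2) 0) 0
  let epsilon : Int := 2 ^ width - 1 - gamma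
  gamma * epsilon

-- ===== PRECONDITION & SPEC =====
-- Pre_ excludes exactly the inputs where the Python A raises: empty report (IndexError),
-- empty first row (int("",2) ValueError), a row shorter than the first (IndexError),
-- or any non-digit character (ValueError).
def Pre_analyze_report (report : List String) : Prop :=
  report ≠ [] ∧ 0 < (report.headD "").length ∧
  (report.all (fun row =>
    decide ((report.headD "").length ≤ row.length) && row.toList.all Char.isDigit)) = true
instance (report : List String) : Decidable (Pre_analyze_report report) := by
  unfold Pre_analyze_report; infer_instance
def pvWitness_analyze_report : List String := ["101", "011", "110"]

def Spec_analyze_report (report : List String) (out : Int) : Prop := out = analyze_report_alt report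
instance (report : List String) (out : Int) : Decidable (Spec_analyze_report report out) := by unfold Spec_analyze_report; infer_instance

-- ===== CLAIM (what is proved, stated in full; the proofs are below) =====
def Claim_equal_analyze_report : Prop := ∀ (report : List String), Dom_analyze_report report → Pre_analyze_report report → Spec_analyze_report report (analyze_report report)

-- ===== LEMMAS AND PROOFS =====

-- per-column ±1 score accumulated by A's outer loop
def pvScore (i : Nat) (L : List String) : Int :=
  (L.map (fun line => if (line.toList.map pvDigit).getD i 0 > 0 then (1 : Int) else -1)).sum

lemma pvFoldA (L : List String) : ∀ g : List Int,
    L.foldl (fun g line =>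
        let ds := line.toList.map pvDigit
        g.mapIdx (fun i v => if ds.getD i 0 > 0 then v + 1 else v - 1)) g
      = g.mapIdx (fun i v => v + pvScore i L) := by
  induction L with
  | nil =>
      intro g
      simp [pvScore]
      apply List.ext_getElem <;> simp
  | cons line L ih =>
      intro g
      simp only [List.foldl_cons, ih]
      apply List.ext_getElem
      · simp
      · intro i h1 h2
        simp [pvScore]
        split <;> ring

lemma pvGetD_map_digit (l : List Char) (i : Nat) :
    (l.map pvDigit).getD i 0 = pvDigit (l.getD i '0') := by
  induction l generalizing i with
  | nil => simp only [List.map_nil, List.getD_nil]; rfl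
  | cons c l ih =>
      cases i with
      | zero => simp
      | succ j => simpa using ih j

-- the 0/1 column read by B at index i
def pvCol (i : Nat) (L : List String) : List Int :=
  L.map (fun row => if 0 < pvDigit (row.toList.getD i '0') then (1 : Int) else 0)

lemma pvScore_col (i : Nat) (L : List String) :
    pvScore i L = 2 * ((pvCol i L).count 1 : Int) - (L.length : Int) := by
  induction L with
  | nil => simp [pvScore, pvCol]
  | cons row L ih =>
      simp only [pvScore, List.map_cons, List.sum_cons, pvCol, List.count_cons,
        pvGetD_map_digit] at ih ⊢
      split_ifs with h <;> simp_all <;> omega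

lemma pvCol01 (i : Nat) (L : List String) : ∀ x ∈ pvCol i L, x = 0 ∨ x = 1 := by
  intro x hx
  simp only [pvCol, List.mem_map] at hx
  obtain ⟨row, _, hr⟩ := hx
  split at hr <;> omega

-- a 0/1 list is a permutation of zeros-then-ones
lemma pvPermRep (l : List Int) (h : ∀ x ∈ l, x = 0 ∨ x = 1) :
    l.Perm (List.replicate (l.count 0) 0 ++ List.replicate (l.count 1) 1) := by
  induction l with
  | nil => simp
  | cons a l ih =>
      have ha := h a (by simp)
      have ihl := ih (fun x hx => h x (by simp [hx]))
      rcases ha with ha | ha <;> subst ha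
      · simpa [List.count_cons, List.replicate_succ] using ihl.cons 0
      · have h0 : List.count 0 ((1:Int) :: l) = l.count 0 := by
          simp [List.count_cons]
        have h1 : List.count 1 ((1:Int) :: l) = l.count 1 + 1 := by
          simp [List.count_cons]
        rw [h0, h1, List.replicate_succ]
        exact (ihl.cons 1).trans List.perm_middle.symm

lemma pvSorted01 (l : List Int) (h : ∀ x ∈ l, x = 0 ∨ x = 1) :
    PySem.List.sorted l (fun x => x) false
      = List.replicate (l.count 0) 0 ++ List.replicate (l.count 1) 1 := by
  apply PySem.List.sorted_id_eq_of_perm_of_pairwise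
  · exact (pvPermRep l h).symm
  · refine List.pairwise_append.mpr ⟨?_, ?_, ?_⟩
    · exact List.pairwise_replicate.mpr (by simp)
    · exact List.pairwise_replicate.mpr (by simp)
    · intro a ha b hb
      rw [List.eq_of_mem_replicate ha, List.eq_of_mem_replicate hb]; omega

lemma pvRepGetD (z o k : Nat) (hk : k < z + o) :
    (List.replicate z (0 : Int) ++ List.replicate o 1).getD k 0
      = if k < z then 0 else 1 := by
  rcases Nat.lt_or_ge k z with h | h
  · rw [if_pos h, List.getD_eq_getElem?_getD, List.getElem?_append_left (by simpa using h)]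
    simp [h]
  · rw [if_neg (by omega), List.getD_eq_getElem?_getD,
      List.getElem?_append_right (by simpa using h)]
    simp only [List.length_replicate, List.getElem?_replicate]
    rw [if_pos (by omega)]
    rfl

-- B's median bit equals the majority test 2*ones ≥ n
lemma pvCount01 (l : List Int) (h : ∀ x ∈ l, x = 0 ∨ x = 1) :
    l.count 0 + l.count 1 = l.length := by
  induction l with
  | nil => simp
  | cons a l ih =>
      have ha := h a (by simp)
      have ihl := ih (fun x hx => h x (by simp [hx]))
      rcases ha with ha | ha <;> subst ha <;> simp <;> omega

-- B's median bit equals the majority test 2*ones >= n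
lemma pvMedian (i : Nat) (L : List String) (hL : L ≠ []) :
    (PySem.List.sorted (pvCol i L) (fun x => x) false).getD (L.length / 2) 0
      = if (L.length : Int) ≤ 2 * ((pvCol i L).count 1 : Int) then 1 else 0 := by
  have hlen : (pvCol i L).length = L.length := by simp [pvCol]
  have hco : (pvCol i L).count 0 + (pvCol i L).count 1 = L.length := by
    rw [← hlen]; exact pvCount01 _ (pvCol01 i L)
  have hn : 0 < L.length := List.length_pos_iff.mpr hL
  rw [pvSorted01 _ (pvCol01 i L), pvRepGetD _ _ _ (by omega)]
  rcases Nat.lt_or_ge (L.length / 2) ((pvCol i L).count 0) with h | h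
  · rw [if_pos h, if_neg (by omega)]
  · rw [if_neg (by omega), if_pos (by omega)]

lemma pvBinToInt_acc (l : List Char) : ∀ a : Int,
    l.foldl (fun a c => 2 * a + (if c = '1' then 1 else 0)) a
      = a * 2 ^ l.length + pvBinToInt l := by
  induction l with
  | nil => intro a; simp [pvBinToInt]
  | cons c l ih =>
      intro a
      show List.foldl _ _ _ = a * 2 ^ (c :: l).length + List.foldl _ _ _
      rw [List.foldl_cons, List.foldl_cons, ih, ih]
      simp only [List.length_cons]
      ring

lemma pvBinToInt_cons (c : Char) (l : List Char) :
    pvBinToInt (c :: l) = (if c = '1' then 1 else 0) * 2 ^ l.length + pvBinToInt l := by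
  show List.foldl _ _ _ = _
  rw [List.foldl_cons, pvBinToInt_acc]
  split_ifs <;> ring

lemma pvBinToInt_flip (l : List Char) (h : ∀ c ∈ l, c = '0' ∨ c = '1') :
    pvBinToInt (l.map (fun c => if c = '1' then '0' else '1'))
      = 2 ^ l.length - 1 - pvBinToInt l := by
  induction l with
  | nil => simp [pvBinToInt]
  | cons c l ih =>
      have hc := h c (by simp)
      have ihl := ih (fun c' hc' => h c' (by simp [hc']))
      rcases hc with hc | hc <;> subst hc <;>
        simp [pvBinToInt_cons, ihl, List.length_cons] <;> ring

lemma pvBitsFold (w : Nat) (c : Nat → Prop) [DecidablePred c] :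
    pvBinToInt ((List.range w).map (fun i => if c i then '1' else '0'))
      = (List.range w).foldl (fun g i => 2 * g + (if c i then (1 : Int) else 0)) 0 := by
  unfold pvBinToInt
  rw [List.foldl_map]
  have : (fun (a : Int) i => 2 * a + if (if c i then '1' else '0') = '1' then (1 : Int) else 0)
      = fun a i => 2 * a + if c i then (1 : Int) else 0 := by
    funext a i
    by_cases h : c i <;> simp [h]
  rw [this]

lemma pvMain (report : List String) (hne : report ≠ []) :
    analyze_report report = analyze_report_alt report := by
  unfold analyze_report analyze_report_alt
  dsimp only
  rw [pvFoldA]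
  set w := (report.headD "").length with hwdef
  set n := report.length with hndef
  have hbits :
      ((List.replicate w (0 : Int)).mapIdx (fun i v => v + pvScore i report)).map
          (fun v => if v < 0 then '0' else '1')
      = (List.range w).map (fun i =>
          if (n : Int) ≤ 2 * ((pvCol i report).count 1 : Int) then '1' else '0') := by
    apply List.ext_getElem
    · simp
    · intro i h1 h2
      simp only [List.getElem_map, List.getElem_mapIdx, List.getElem_replicate,
        List.getElem_range, zero_add]
      rw [pvScore_col]
      rcases le_or_gt (n : Int) (2 * ((pvCol i report).count 1 : Int)) with hge | hlt
      · rw [if_neg (by omega), if_pos hge]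
      · rw [if_pos (by omega), if_neg (by omega)]
  rw [hbits]
  have hfun : (fun (g : Int) (i : Nat) =>
        2 * g + (PySem.List.sorted
          (report.map (fun row => if 0 < pvDigit (row.toList.getD i '0') then (1 : Int) else 0))
          (fun x => x) false).getD (n / 2) 0)
      = fun (g : Int) i => 2 * g + (if (n : Int) ≤ 2 * ((pvCol i report).count 1 : Int) then 1 else 0) := by
    funext g i
    rw [show (report.map (fun row => if 0 < pvDigit (row.toList.getD i '0') then (1 : Int) else 0))
          = pvCol i report from rfl]
    rw [hndef, pvMedian i report hne]
  rw [hfun]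
  rw [pvBinToInt_flip _ (by
    intro c hc
    simp only [List.mem_map] at hc
    obtain ⟨i, _, hi⟩ := hc
    split at hi <;> simp [← hi])]
  rw [pvBitsFold w (fun i => (n : Int) ≤ 2 * ((pvCol i report).count 1 : Int))]
  simp

-- ===== VERDICT (by name: the statement is the Claim_ definition above) =====
theorem analyze_report_spec : Claim_equal_analyze_report := by
  intro report _ hpre
  exact pvMain report hpre.1
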